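-- pv_equiv track=rewrite | github.com/Brownie2002/AdventOfCode2023 | day5/main.py | target_ranges
-- ===== SOURCE A (Python) =====
-- def compute_target_number( source, rules ):
--
--     target=source
--     remaining_range=1
--
--     # Check if the source is in a range of the rules
--     for rule in rules:
--         if source >= rule[1] and source < (rule[1] + rule[2]):
--             # I am in the correct range
--             target = source + ( rule[0] - rule[1])
--             remaining_range = rule[0] + rule[2] - target
--
--     return target, remaining_range
--
-- def target_ranges(input_number, input_range, rules):
--     """_summary_
--
--     Args:
--         first_number (_type_): _description_
--         range (_type_): _description_
--         rules (_type_): Rules [[dst_start, src_start, nb]]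
--
--     Returns:
--         _type_: _description_
--     """
--
--     splitted_ranges=[]
--
--
--     while True:
--         first_target, availability_range = compute_target_number(input_number, rules)
--         splitted_ranges.append({"item_number":first_target , "range":availability_range})
--         if availability_range > input_range:
--             # The whole range is covered
--             break
--         else:
--             # Need to split the range and compute another
--             input_number = input_number + availability_range + 1
--             input_range = input_range - availability_range
--
--     return splitted_ranges
-- ===== SOURCE B (Python) =====
-- def target_ranges(input_number, input_range, rules):
--     # Build a disjoint "override" interval map once: later rules overwrite earlier
--     # ones on their source range, so per-chunk lookup is a first-match scan over
--     # disjoint segments instead of a last-match scan over all rules.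
--     # Each segment is (lo, hi, delta, end): sources in [lo, hi) map to x+delta,
--     # with remaining range end - x (end = the owning rule's original src end).
--     segs = []
--     for rule in rules:
--         d, s, n = rule[0], rule[1], rule[2]
--         if n <= 0:
--             continue
--         t = s + n
--         new_segs = []
--         for lo, hi, delta, e in segs:
--             if lo < min(hi, s):
--                 new_segs.append((lo, min(hi, s), delta, e))
--             if max(lo, t) < hi:
--                 new_segs.append((max(lo, t), hi, delta, e))
--         new_segs.append((s, t, d - s, t))
--         segs = new_segs
--
--     # collect plain (target, avail) pairs first; build the dicts once at the end
--     pairs = []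
--     while True:
--         target, avail = input_number, 1
--         for lo, hi, delta, e in segs:
--             if lo <= input_number < hi:
--                 target, avail = input_number + delta, e - input_number
--                 break
--         pairs.append((target, avail))
--         if avail > input_range:
--             return [{"item_number": t, "range": a} for t, a in pairs]
--         input_number += avail + 1
--         input_range -= avail
-- ===== Notes on version B (the rewrite author's own statement) =====
-- stated objective: faster
-- what changed: B precompiles the rules once into a disjoint 'override' interval map (later rules clip earlier ones), so each chunk is resolved by a first-match scan with early break over the disjoint segments instead of A's last-match scan over all R rules per chunk.
-- outside the precondition, e.g. on target_ranges(-1, -1, [[1, 1], [0, 1]]): A returns [{'item_number': -1, 'range': 1}], B raises IndexError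
import Mathlib
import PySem

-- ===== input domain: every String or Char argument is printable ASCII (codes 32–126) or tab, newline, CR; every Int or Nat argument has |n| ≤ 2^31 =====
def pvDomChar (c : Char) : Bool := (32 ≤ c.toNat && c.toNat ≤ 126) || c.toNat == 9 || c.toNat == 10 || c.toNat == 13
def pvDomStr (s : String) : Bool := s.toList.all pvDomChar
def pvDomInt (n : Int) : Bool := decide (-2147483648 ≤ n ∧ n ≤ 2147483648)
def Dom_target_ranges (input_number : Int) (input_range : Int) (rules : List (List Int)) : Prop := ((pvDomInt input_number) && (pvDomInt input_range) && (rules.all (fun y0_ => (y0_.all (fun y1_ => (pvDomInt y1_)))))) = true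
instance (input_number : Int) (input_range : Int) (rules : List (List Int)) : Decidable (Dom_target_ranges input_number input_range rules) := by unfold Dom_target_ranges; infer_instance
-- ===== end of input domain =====

-- B replaces A's per-chunk last-match scan over all rules by a disjoint "override"
-- interval map built once and looked up by first match with early exit (objective: faster,
-- measured).

-- ===== PORT A =====
-- rule[0]/rule[1]/rule[2]: exact under Pre_ (every rule has length ≥ 3, where Python
-- never raises); the .getD 0 only pads rules shorter than 3, which Pre_ excludes.
def ctnStep (source : Int) (acc : Int × Int) (rule : List Int) : Int × Int :=
  let r0 := (PySem.List.pyGet? rule 0).getD 0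
  let r1 := (PySem.List.pyGet? rule 1).getD 0
  let r2 := (PySem.List.pyGet? rule 2).getD 0
  if source ≥ r1 ∧ source < r1 + r2 then
    (source + (r0 - r1), r0 + r2 - (source + (r0 - r1)))
  else acc

def compute_target_number (source : Int) (rules : List (List Int)) : Int × Int :=
  rules.foldl (ctnStep source) (source, 1)

-- availability_range is always ≥ 1 (needed for the loop's termination measure)
theorem ctn_snd_pos (source : Int) (rules : List (List Int)) :
    1 ≤ (compute_target_number source rules).2 := by
  unfold compute_target_number
  have h : ∀ (l : List (List Int)) (acc : Int × Int), 1 ≤ acc.2 →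
      1 ≤ (l.foldl (ctnStep source) acc).2 := by
    intro l
    induction l with
    | nil => intro acc h; simpa using h
    | cons r t ih =>
      intro acc h
      simp only [List.foldl_cons]
      apply ih
      simp only [ctnStep]
      split_ifs with hc
      · omega
      · exact h
  exact h rules (source, 1) (by norm_num)

def trLoopA (rules : List (List Int)) (input_number input_range : Int) :
    List (List (String × Int)) :=
  if h : (compute_target_number input_number rules).2 > input_range then
    [[("item_number", (compute_target_number input_number rules).1),
      ("range", (compute_target_number input_number rules).2)]]
  else
    [("item_number", (compute_target_number input_number rules).1),
     ("range", (compute_target_number input_number rules).2)] ::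
      trLoopA rules (input_number + (compute_target_number input_number rules).2 + 1)
        (input_range - (compute_target_number input_number rules).2)
termination_by input_range.toNat
decreasing_by
  have := ctn_snd_pos input_number rules
  omega

def target_ranges (input_number : Int) (input_range : Int) (rules : List (List Int)) : List (List (String × Int)) :=
  trLoopA rules input_number input_range

-- ===== PORT B =====
-- a segment (lo, hi, delta, e): sources in [lo, hi) map to x + delta, remaining e - x;
-- piecesOf = the two conditional appends of Source B's inner loop over the old segments
def piecesOf (s t : Int) (sg : Int × Int × Int × Int) : List (Int × Int × Int × Int) :=
  (if sg.1 < min sg.2.1 s then [(sg.1, min sg.2.1 s, sg.2.2.1, sg.2.2.2)] else []) ++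
  (if max sg.1 t < sg.2.1 then [(max sg.1 t, sg.2.1, sg.2.2.1, sg.2.2.2)] else [])

-- one iteration of Source B's 'for rule in rules' build loop; rule[i] exact as in port A
def insertSeg (segs : List (Int × Int × Int × Int)) (rule : List Int) :
    List (Int × Int × Int × Int) :=
  let d := (PySem.List.pyGet? rule 0).getD 0
  let s := (PySem.List.pyGet? rule 1).getD 0
  let n := (PySem.List.pyGet? rule 2).getD 0
  if n ≤ 0 then segs
  else (segs.foldl (fun acc sg => acc ++ piecesOf s (s + n) sg) []) ++ [(s, s + n, d - s, s + n)]

def buildSegs (rules : List (List Int)) : List (Int × Int × Int × Int) :=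
  rules.foldl insertSeg []

-- Source B's 'for lo, hi, delta, e in segs: … break' first-match lookup
def lookupSegs : List (Int × Int × Int × Int) → Int → Int × Int
  | [], x => (x, 1)
  | (lo, hi, delta, e) :: rest, x =>
    if lo ≤ x ∧ x < hi then (x + delta, e - x) else lookupSegs rest x

-- Source B's 'while True' loop collecting (target, avail) pairs; fuel is only a totality
-- guard (never exhausted on segments built by buildSegs: the remaining range is then ≥ 1)
def trLoopB (segs : List (Int × Int × Int × Int)) (fuel : Nat)
    (input_number input_range : Int) : List (Int × Int) :=
  match fuel with
  | 0 => []
  | fuel + 1 =>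
    let p := lookupSegs segs input_number
    if p.2 > input_range then [p]
    else p :: trLoopB segs fuel (input_number + p.2 + 1) (input_range - p.2)

def target_ranges_alt (input_number : Int) (input_range : Int) (rules : List (List Int)) : List (List (String × Int)) :=
  (trLoopB (buildSegs rules) (input_range.toNat + 1) input_number input_range).map
    (fun p => [("item_number", p.1), ("range", p.2)])

-- ===== PRECONDITION & SPEC =====
-- Pre_ excludes rules shorter than 3 entries: Python A raises IndexError on them,
-- except when such a rule sits after the short-circuit 'and' and is never matched
-- (then A returns but B raises); the function's stated format is [[dst_start, src_start, nb]].
def Pre_target_ranges (input_number : Int) (input_range : Int) (rules : List (List Int)) : Prop :=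
  ∀ r ∈ rules, 3 ≤ r.length
instance (input_number : Int) (input_range : Int) (rules : List (List Int)) : Decidable (Pre_target_ranges input_number input_range rules) := by unfold Pre_target_ranges; infer_instance

def pvWitness_target_ranges : Int × Int × List (List Int) := (0, 5, [[10, 2, 3]])

def Spec_target_ranges (input_number : Int) (input_range : Int) (rules : List (List Int)) (out : List (List (String × Int))) : Prop := out = target_ranges_alt input_number input_range rules
instance (input_number : Int) (input_range : Int) (rules : List (List Int)) (out : List (List (String × Int))) : Decidable (Spec_target_ranges input_number input_range rules out) := by unfold Spec_target_ranges; infer_instance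

-- ===== CLAIM (what is proved, stated in full; the proofs are below) =====
def Claim_equal_target_ranges : Prop := ∀ (input_number : Int) (input_range : Int) (rules : List (List Int)), Dom_target_ranges input_number input_range rules → Pre_target_ranges input_number input_range rules → Spec_target_ranges input_number input_range rules (target_ranges input_number input_range rules)

-- ===== LEMMAS AND PROOFS =====

theorem lookupSegs_cons_pos (lo hi d e x : Int) (rest : List (Int × Int × Int × Int))
    (h : lo ≤ x ∧ x < hi) :
    lookupSegs ((lo, hi, d, e) :: rest) x = (x + d, e - x) := by
  simp only [lookupSegs, if_pos h]

theorem lookupSegs_cons_neg (lo hi d e x : Int) (rest : List (Int × Int × Int × Int))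
    (h : ¬(lo ≤ x ∧ x < hi)) :
    lookupSegs ((lo, hi, d, e) :: rest) x = lookupSegs rest x := by
  simp only [lookupSegs, if_neg h]

-- if x is not in [lo, hi) \ [s, t), the clipped pieces of (lo, hi) do not contain x
theorem pieces_skip (s t lo hi d e x : Int) (L : List (Int × Int × Int × Int))
    (h : ¬(lo ≤ x ∧ x < hi) ∨ (s ≤ x ∧ x < t)) :
    lookupSegs (piecesOf s t (lo, hi, d, e) ++ L) x = lookupSegs L x := by
  simp only [piecesOf, Prod.fst, Prod.snd]
  split_ifs with h1 h2 h2 <;>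
    simp only [List.nil_append, List.append_nil, List.cons_append, List.singleton_append] <;>
    repeat rw [lookupSegs_cons_neg _ _ _ _ _ _ (by omega)]

-- if x is in [lo, hi) but not in [s, t), exactly one clipped piece contains x,
-- and it carries the same delta and original end
theorem pieces_match (s t lo hi d e x : Int) (L : List (Int × Int × Int × Int))
    (hm : lo ≤ x ∧ x < hi) (hout : ¬(s ≤ x ∧ x < t)) :
    lookupSegs (piecesOf s t (lo, hi, d, e) ++ L) x = (x + d, e - x) := by
  simp only [piecesOf, Prod.fst, Prod.snd]
  by_cases hx : x < s
  · have h1 : lo < min hi s := by omega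
    rw [if_pos h1]
    simp only [List.cons_append, List.singleton_append]
    split_ifs with h2 <;>
      simp only [List.cons_append, List.singleton_append, List.nil_append] <;>
      rw [lookupSegs_cons_pos _ _ _ _ _ _ (by omega)]
  · have hx2 : t ≤ x := by omega
    have h2 : max lo t < hi := by omega
    rw [if_pos h2]
    split_ifs with h1 <;>
      simp only [List.cons_append, List.singleton_append, List.nil_append]
    · rw [lookupSegs_cons_neg _ _ _ _ _ _ (by omega),
         lookupSegs_cons_pos _ _ _ _ _ _ (by omega)]
    · rw [lookupSegs_cons_pos _ _ _ _ _ _ (by omega)]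

-- the key step: inserting one rule into the segment map commutes with one step of
-- A's last-match accumulator
theorem lookup_insert (segs : List (Int × Int × Int × Int)) (rule : List Int) (x : Int) :
    lookupSegs (insertSeg segs rule) x = ctnStep x (lookupSegs segs x) rule := by
  simp only [insertSeg, ctnStep]
  generalize (PySem.List.pyGet? rule 0).getD 0 = d
  generalize (PySem.List.pyGet? rule 1).getD 0 = s
  generalize (PySem.List.pyGet? rule 2).getD 0 = n
  split_ifs with hn hc hc
  · omega
  · rfl
  · -- x in [s, s+n): clipped pieces never contain x, the appended segment does
    rw [PySem.List.foldl_append_eq_flatMap]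
    simp only [List.nil_append]
    induction segs with
    | nil =>
      simp only [List.flatMap_nil, List.nil_append]
      rw [lookupSegs_cons_pos s (s + n) (d - s) (s + n) x [] (by omega)]
      simp only [Prod.mk.injEq]
      exact ⟨trivial, by omega⟩
    | cons sg rest ih =>
      obtain ⟨lo, hi, dd, e⟩ := sg
      simp only [List.flatMap_cons, List.append_assoc]
      rw [pieces_skip s (s + n) lo hi dd e x _ (Or.inr (by omega))]
      exact ih
  · -- x outside [s, s+n): lookup over clipped pieces agrees with lookup over old segs
    rw [PySem.List.foldl_append_eq_flatMap]
    simp only [List.nil_append]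
    induction segs with
    | nil =>
      simp only [List.flatMap_nil, List.nil_append]
      rw [lookupSegs_cons_neg s (s + n) (d - s) (s + n) x [] (by omega)]
    | cons sg rest ih =>
      obtain ⟨lo, hi, dd, e⟩ := sg
      simp only [List.flatMap_cons, List.append_assoc]
      by_cases hm : lo ≤ x ∧ x < hi
      · rw [pieces_match s (s + n) lo hi dd e x _ hm (by omega),
           lookupSegs_cons_pos lo hi dd e x rest hm]
      · rw [pieces_skip s (s + n) lo hi dd e x _ (Or.inl hm),
           lookupSegs_cons_neg lo hi dd e x rest hm]
        exact ih

theorem lookup_build_aux (rules : List (List Int)) :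
    ∀ (segs : List (Int × Int × Int × Int)) (x : Int),
      lookupSegs (rules.foldl insertSeg segs) x = rules.foldl (ctnStep x) (lookupSegs segs x) := by
  induction rules with
  | nil => intro segs x; rfl
  | cons rule rest ih =>
    intro segs x
    simp only [List.foldl_cons]
    rw [ih, lookup_insert]

theorem lookup_build (rules : List (List Int)) (x : Int) :
    lookupSegs (buildSegs rules) x = compute_target_number x rules := by
  unfold buildSegs compute_target_number
  rw [lookup_build_aux]
  rfl

theorem loops_eq (rules : List (List Int)) :
    ∀ (fuel : Nat) (n r : Int), r.toNat < fuel →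
      trLoopA rules n r = (trLoopB (buildSegs rules) fuel n r).map
        (fun p => [("item_number", p.1), ("range", p.2)]) := by
  intro fuel
  induction fuel with
  | zero => intro n r h; omega
  | succ f ih =>
    intro n r h
    rw [trLoopA]
    simp only [trLoopB, lookup_build, List.map_cons]
    have hpos := ctn_snd_pos n rules
    by_cases hgt : (compute_target_number n rules).2 > r
    · rw [dif_pos hgt, if_pos hgt]
      simp
    · rw [dif_neg hgt, if_neg hgt]
      simp only [List.map_cons]
      congr 1
      exact ih _ _ (by omega)

-- ===== VERDICT (by name: the statement is the Claim_ definition above) =====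
theorem target_ranges_spec : Claim_equal_target_ranges := by
  intro n r rules _ _
  unfold Spec_target_ranges target_ranges target_ranges_alt
  exact loops_eq rules (r.toNat + 1) n r (by omega)
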